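-- pv_equiv track=rewrite | github.com/leekh4232/study-coding-test | 프로그래머스/0/120886. A로 B 만들기/A로 B 만들기.py | solution
-- ===== SOURCE A (Python) =====
-- def solution(before, after):
--     # 기본적으로 만들 수 있다고 가정하고 1로 설정
--     answer = 1
--
--     # before의 각 문자를 after에서 찾음
--     for b in before:
--         # after에서 현재 문자의 위치 찾기
--         f = after.find(b)
--
--         # 문자가 없다면 만들 수 없으므로 0 반환
--         if f == -1:
--             answer = 0
--             break
--
--         # 찾은 문자를 제거하여 중복 처리 방지
--         after = after[:f] + after[f+1:]
--
--     # 최종적으로 만들 수 있는 경우 1, 그렇지 않으면 0 반환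
--     return answer
-- ===== SOURCE B (Python) =====
-- def solution(before, after):
--     sb = sorted(before)
--     sa = sorted(after)
--     i = j = 0
--     while i < len(sb):
--         while j < len(sa) and sa[j] < sb[i]:
--             j += 1
--         if j == len(sa) or sa[j] != sb[i]:
--             return 0
--         i += 1
--         j += 1
--     return 1
-- ===== Notes on version B (the rewrite author's own statement) =====
-- stated objective: faster
-- what changed: Replaces A's repeated find()-and-rebuild deletion over the shrinking string with sorting both strings once and a single two-pointer merge walk that matches each needed character in order.
import Mathlib
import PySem

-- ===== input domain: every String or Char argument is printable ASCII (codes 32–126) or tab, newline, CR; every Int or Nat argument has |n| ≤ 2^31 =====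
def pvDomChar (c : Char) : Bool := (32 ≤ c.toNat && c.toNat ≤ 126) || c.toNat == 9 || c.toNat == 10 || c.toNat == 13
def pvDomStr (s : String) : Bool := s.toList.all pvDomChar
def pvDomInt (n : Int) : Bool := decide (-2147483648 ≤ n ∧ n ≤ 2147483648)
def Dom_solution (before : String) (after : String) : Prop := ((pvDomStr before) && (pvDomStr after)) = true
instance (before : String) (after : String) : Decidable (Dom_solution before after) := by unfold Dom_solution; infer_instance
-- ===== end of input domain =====

-- B sorts both strings once and matches them with a single two-pointer merge walk,
-- replacing A's repeated find()-and-rebuild deletion; return values only (A rebinds a local).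

-- ===== PORT A =====
-- the for-loop over before, carrying the shrinking `after`; `break` = immediate 0
def solutionGo : List Char → List Char → Int
  | [], _ => 1
  | b :: bs, aft =>
      let f := PySem.Chars.find aft [b]
      if f = -1 then 0
      else solutionGo bs (PySem.Chars.slice aft none (some f) ++ PySem.Chars.slice aft (some (f + 1)) none)

def solution (before : String) (after : String) : Int :=
  solutionGo before.toList after.toList

-- ===== PORT B =====
-- the two nested while loops of Source B: the inner loop advances j (drops the head of sa)
-- while sa[j] < sb[i]; on a match both pointers advance (both heads are dropped)
def mergeGo : List Char → List Char → Int
  | [], _ => 1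
  | _ :: _, [] => 0
  | b :: bs, a :: as =>
      if a < b then mergeGo (b :: bs) as
      else if a = b then mergeGo bs as
      else 0
termination_by sb sa => (sb.length, sa.length)

def solution_alt (before : String) (after : String) : Int :=
  mergeGo (PySem.List.sorted before.toList (fun c => c) false)
          (PySem.List.sorted after.toList (fun c => c) false)

-- ===== PRECONDITION & SPEC =====
def Spec_solution (before : String) (after : String) (out : Int) : Prop := out = solution_alt before after
instance (before : String) (after : String) (out : Int) : Decidable (Spec_solution before after out) := by unfold Spec_solution; infer_instance

-- ===== CLAIM (what is proved, stated in full; the proofs are below) =====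
def Claim_equal_solution : Prop := ∀ (before : String) (after : String), Dom_solution before after → Spec_solution before after (solution before after)

-- ===== LEMMAS AND PROOFS =====

-- [b] is infix of l iff b is an element
lemma singleton_infix_iff (b : Char) (l : List Char) : [b] <:+: l ↔ b ∈ l := by
  constructor
  · rintro ⟨s, t, h⟩
    subst h; simp
  · intro h
    obtain ⟨s, t, h⟩ := List.append_of_mem h
    exact ⟨s, t, by simp [h]⟩

-- removing the first occurrence (at index k) is List.erase
lemma take_drop_eq_erase (b : Char) :
    ∀ (l : List Char) (k : Nat) (hk : k < l.length), l[k]'hk = b →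
      (∀ i (hi : i < k), l[i]'(by omega) ≠ b) →
      l.take k ++ l.drop (k + 1) = l.erase b
  | [], k, hk, _, _ => by simp at hk
  | a :: t, 0, _, hb, _ => by simp at hb; simp [hb]
  | a :: t, k + 1, hk, hb, hmin => by
      have ha : a ≠ b := hmin 0 (by omega)
      have ih := take_drop_eq_erase b t k (by simpa using hk) (by simpa using hb)
        (fun i hi => by
          have := hmin (i + 1) (by omega)
          simpa using this)
      simp [ha, ih]

-- the find f in A's loop body: characterisation when b ∈ aft
lemma find_mem_spec (b : Char) (aft : List Char) (h : b ∈ aft) :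
    0 ≤ PySem.Chars.find aft [b] ∧
    (PySem.Chars.find aft [b]).toNat < aft.length ∧
    aft[(PySem.Chars.find aft [b]).toNat]? = some b ∧
    (∀ i < (PySem.Chars.find aft [b]).toNat, aft[i]? ≠ some b) := by
  have h0 : 0 ≤ PySem.Chars.find aft [b] :=
    (PySem.Chars.find_nonneg_iff aft [b]).2 ((singleton_infix_iff b aft).2 h)
  obtain ⟨hpre, hmin⟩ := PySem.Chars.find_spec h0
  set k := (PySem.Chars.find aft [b]).toNat with hk
  have hklen : k < aft.length := by
    by_contra hge
    rw [not_lt] at hge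
    rw [List.drop_eq_nil_of_le hge] at hpre
    simpa using hpre.length_le
  refine ⟨h0, hklen, ?_, ?_⟩
  · obtain ⟨t, ht⟩ := hpre
    have : aft.drop k = b :: t := by simpa using ht.symm
    have := congrArg List.head? this
    simpa [List.head?_drop] using this
  · intro i hi hib
    apply hmin i hi
    have hil : i < aft.length := by omega
    refine ⟨aft.drop (i + 1), ?_⟩
    have : aft.drop i = aft[i] :: aft.drop (i + 1) := List.drop_eq_getElem_cons hil
    rw [this]
    simp [List.getElem?_eq_getElem hil] at hib
    simp [hib]

-- A's loop answers the subpermutation question: 1 iff bs is a sub-multiset of aft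
lemma solutionGo_eq_subperm : ∀ (bs aft : List Char),
    solutionGo bs aft = if List.Subperm bs aft then 1 else 0
  | [], aft => by simp [solutionGo]
  | b :: bs, aft => by
    by_cases hmem : b ∈ aft
    · obtain ⟨h0, hklen, hget, hmin⟩ := find_mem_spec b aft hmem
      have hne' : ¬ (PySem.Chars.find aft [b] = -1) := by omega
      have hslice₁ : PySem.Chars.slice aft none (some (PySem.Chars.find aft [b])) =
          aft.take (PySem.Chars.find aft [b]).toNat := by
        rw [PySem.Chars.slice_eq_listSlice]; exact PySem.List.slice_to aft h0
      have hslice₂ : PySem.Chars.slice aft (some (PySem.Chars.find aft [b] + 1)) none =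
          aft.drop (PySem.Chars.find aft [b] + 1).toNat := by
        rw [PySem.Chars.slice_eq_listSlice]; exact PySem.List.slice_from aft (by omega)
      have hts : (PySem.Chars.find aft [b] + 1).toNat = (PySem.Chars.find aft [b]).toNat + 1 := by omega
      have herase : aft.take (PySem.Chars.find aft [b]).toNat ++
          aft.drop ((PySem.Chars.find aft [b]).toNat + 1) = aft.erase b := by
        apply take_drop_eq_erase b aft (PySem.Chars.find aft [b]).toNat hklen
        · simpa [List.getElem?_eq_getElem hklen] using hget
        · intro i hi
          have := hmin i hi
          have hil : i < aft.length := by omega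
          simpa [List.getElem?_eq_getElem hil] using this
      have hiff : List.Subperm (b :: bs) aft ↔ List.Subperm bs (aft.erase b) := by
        constructor
        · intro h
          rw [List.subperm_ext_iff] at h ⊢
          intro c hc
          have hcnt := h c (by simp [hc])
          rw [List.count_erase]
          by_cases hcb : c = b
          · subst hcb; simp at hcnt ⊢; omega
          · have h2 : (b == c) = false := beq_eq_false_iff_ne.mpr (fun h => hcb h.symm)
            have hbc : ¬ b = c := fun h => hcb h.symm
            have hcc : List.count c (b :: bs) = List.count c bs := by
              simp [hbc]
            rw [hcc] at hcnt
            simpa [h2] using hcnt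
        · intro h
          have h1 : List.Subperm (b :: bs) (b :: aft.erase b) := (List.subperm_cons b).2 h
          exact h1.trans (List.perm_cons_erase hmem).symm.subperm
      simp only [solutionGo]
      rw [if_neg hne', hslice₁, hslice₂, hts, herase,
        solutionGo_eq_subperm bs (aft.erase b)]
      by_cases h : List.Subperm bs (aft.erase b)
      · rw [if_pos h, if_pos (hiff.2 h)]
      · rw [if_neg h, if_neg (fun hc => h (hiff.1 hc))]
    · have hne : PySem.Chars.find aft [b] = -1 := by
        rw [PySem.Chars.find_eq_neg_one_iff, singleton_infix_iff]; exact hmem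
      have hnsp : ¬ List.Subperm (b :: bs) aft := fun h => hmem (h.subset (by simp))
      simp [solutionGo, hne, hnsp]

-- B's merge walk answers the same question on sorted inputs
lemma mergeGo_eq_subperm : ∀ (sb sa : List Char),
    sb.Pairwise (· ≤ ·) → sa.Pairwise (· ≤ ·) →
    mergeGo sb sa = if List.Subperm sb sa then 1 else 0
  | [], sa, _, _ => by simp [mergeGo]
  | b :: bs, [], _, _ => by simp [mergeGo]
  | b :: bs, a :: as, hb, ha => by
    by_cases hlt : a < b
    · have hnotmem : a ∉ b :: bs := by
        intro hm
        rcases List.mem_cons.1 hm with he | hm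
        · exact lt_irrefl b (he ▸ hlt)
        · exact absurd ((List.pairwise_cons.1 hb).1 a hm) (not_le.2 hlt)
      have hiff : List.Subperm (b :: bs) (a :: as) ↔ List.Subperm (b :: bs) as := by
        constructor
        · intro h
          rw [List.subperm_ext_iff] at h ⊢
          intro c hc
          have hca : c ≠ a := fun he => hnotmem (he ▸ hc)
          have hcnt := h c hc
          have hac : ¬ a = c := fun h => hca h.symm
          have h4 : List.count c (a :: as) = List.count c as := by
            simp [hac]
          rwa [h4] at hcnt
        · intro h
          exact h.trans (List.sublist_cons_self a as).subperm
      rw [mergeGo, if_pos hlt, mergeGo_eq_subperm (b :: bs) as hb (List.Pairwise.of_cons ha)]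
      by_cases h : List.Subperm (b :: bs) as
      · rw [if_pos h, if_pos (hiff.2 h)]
      · rw [if_neg h, if_neg (fun hc => h (hiff.1 hc))]
    · by_cases heq : a = b
      · subst heq
        rw [mergeGo, if_neg hlt, if_pos rfl,
          mergeGo_eq_subperm bs as (List.Pairwise.of_cons hb) (List.Pairwise.of_cons ha)]
        by_cases h : List.Subperm bs as
        · rw [if_pos h, if_pos ((List.subperm_cons a).2 h)]
        · rw [if_neg h, if_neg (fun hc => h ((List.subperm_cons a).1 hc))]
      · have hba : b < a := lt_of_le_of_ne (not_lt.1 hlt) (fun h => heq h.symm)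
        have hnotmem : b ∉ a :: as := by
          intro hm
          rcases List.mem_cons.1 hm with he | hm
          · exact lt_irrefl b (he ▸ hba)
          · exact absurd ((List.pairwise_cons.1 ha).1 b hm) (not_le.2 hba)
        have hnsp : ¬ List.Subperm (b :: bs) (a :: as) := fun h => hnotmem (h.subset (by simp))
        rw [mergeGo, if_neg hlt, if_neg heq, if_neg hnsp]
termination_by sb sa => (sb.length, sa.length)

-- ===== VERDICT (by name: the statement is the Claim_ definition above) =====
theorem solution_spec : Claim_equal_solution := by
  intro before after _
  unfold Spec_solution solution solution_alt
  rw [solutionGo_eq_subperm,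
    mergeGo_eq_subperm _ _
      (by simpa using PySem.List.sorted_pairwise before.toList (fun c => c))
      (by simpa using PySem.List.sorted_pairwise after.toList (fun c => c))]
  have hp1 := PySem.List.sorted_perm before.toList (fun c => c) false
  have hp2 := PySem.List.sorted_perm after.toList (fun c => c) false
  by_cases h : List.Subperm before.toList after.toList
  · rw [if_pos h, if_pos (hp2.subperm_left.2 (hp1.subperm.trans h))]
  · rw [if_neg h, if_neg (fun hc => h (hp1.symm.subperm.trans (hp2.subperm_left.1 hc)))]
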